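-- pv_equiv track=rewrite | github.com/farhann-saleem/soch-probabilty | src/data_loader.py | normalize_header_name
-- ===== SOURCE A (Python) =====
-- def normalize_header_name(value: str) -> str:
--     compact = (
--         value.replace("\u00a0", " ")
--         .strip()
--         .lower()
--         .replace("&", " and ")
--         .replace("/", " ")
--         .replace("-", " ")
--         .replace("–", " ")
--     )
--     sanitized = []
--     last_was_underscore = False
--
--     for character in compact:
--         if character.isalnum():
--             sanitized.append(character)
--             last_was_underscore = False
--             continue
--         if not last_was_underscore:
--             sanitized.append("_")
--             last_was_underscore = True
--
--     return "".join(sanitized).strip("_")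
-- ===== SOURCE B (Python) =====
-- def normalize_header_name(value: str) -> str:
--     compact = (
--         value.replace("\u00a0", " ")
--         .strip()
--         .lower()
--         .replace("&", " and ")
--         .replace("/", " ")
--         .replace("-", " ")
--         .replace("\u2013", " ")
--     )
--     masked = "".join(c if c.isalnum() else " " for c in compact)
--     return "_".join(masked.split())
-- ===== Notes on version B (the rewrite author's own statement) =====
-- stated objective: simpler
-- what changed: B replaces A's stateful char-by-char loop (last_was_underscore flag) plus final underscore strip by masking every non-alphanumeric character to a space, tokenizing with str.split(), and joining the words with an underscore.
import Mathlib
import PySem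

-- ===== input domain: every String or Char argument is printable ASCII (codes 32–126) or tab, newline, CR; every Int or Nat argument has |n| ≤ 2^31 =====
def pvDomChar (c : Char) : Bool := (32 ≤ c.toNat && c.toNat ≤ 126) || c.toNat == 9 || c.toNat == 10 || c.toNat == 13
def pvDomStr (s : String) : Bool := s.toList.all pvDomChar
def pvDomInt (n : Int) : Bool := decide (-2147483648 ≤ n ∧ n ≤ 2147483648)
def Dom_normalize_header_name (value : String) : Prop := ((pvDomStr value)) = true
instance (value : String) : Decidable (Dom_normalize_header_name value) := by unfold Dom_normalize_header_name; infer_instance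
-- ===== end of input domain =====

-- B normalizes the header by masking non-alphanumerics to spaces, splitting on whitespace and
-- joining the words with '_', instead of A's flag-driven loop followed by strip('_').

-- the chained replace/strip/lower producing `compact` — identical text in both Pythons
def pvCompact (value : String) : List Char :=
  PySem.Chars.replace (PySem.Chars.replace (PySem.Chars.replace (PySem.Chars.replace
    (PySem.Chars.lower (PySem.Chars.strip (PySem.Chars.replace value.toList ['\u00A0'] [' '])))
    ['&'] (" and ".toList)) ['/'] [' ']) ['-'] [' ']) ['–'] [' ']

-- ===== PORT A =====
-- the `for character in compact` loop over the state (sanitized, last_was_underscore)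
def pvSanitize (last : Bool) : List Char → List Char
  | [] => []
  | c :: rest =>
    if PySem.Chars.isalnum c then c :: pvSanitize false rest
    else if last then pvSanitize true rest
    else '_' :: pvSanitize true rest

def normalize_header_name (value : String) : String :=
  String.ofList (PySem.Chars.stripChars (pvSanitize false (pvCompact value)) ['_'])

-- ===== PORT B =====
def pvMask (c : Char) : Char := if PySem.Chars.isalnum c then c else ' '

def normalize_header_name_alt (value : String) : String :=
  String.ofList (PySem.Chars.join ['_'] (PySem.Chars.split₀ ((pvCompact value).map pvMask)))

-- ===== PRECONDITION & SPEC =====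
def Spec_normalize_header_name (value : String) (out : String) : Prop := out = normalize_header_name_alt value
instance (value : String) (out : String) : Decidable (Spec_normalize_header_name value out) := by unfold Spec_normalize_header_name; infer_instance

-- ===== CLAIM (what is proved, stated in full; the proofs are below) =====
def Claim_equal_normalize_header_name : Prop := ∀ (value : String), Dom_normalize_header_name value → Spec_normalize_header_name value (normalize_header_name value)

-- ===== LEMMAS AND PROOFS =====

-- maximal alphanumeric runs of a char list (canonical form both ports are reduced to)
def pvTokens : List Char → List (List Char)
  | [] => []
  | c :: rest =>
    if PySem.Chars.isalnum c then
      (c :: rest.takeWhile PySem.Chars.isalnum) :: pvTokens (rest.dropWhile PySem.Chars.isalnum)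
    else pvTokens rest
termination_by cs => cs.length
decreasing_by
  · have := List.length_dropWhile_le PySem.Chars.isalnum rest
    simp only [List.length_cons]; omega
  · simp only [List.length_cons]; omega

lemma tokens_nil : pvTokens [] = [] := by rw [pvTokens]

lemma tokens_cons_pos (c : Char) (rest : List Char) (hc : PySem.Chars.isalnum c = true) :
    pvTokens (c :: rest) =
      (c :: rest.takeWhile PySem.Chars.isalnum) :: pvTokens (rest.dropWhile PySem.Chars.isalnum) := by
  rw [pvTokens]; simp [hc]

lemma tokens_cons_neg (c : Char) (rest : List Char) (hc : PySem.Chars.isalnum c = false) :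
    pvTokens (c :: rest) = pvTokens rest := by
  rw [pvTokens]; simp [hc]

lemma char_le_iff_toNat (a c : Char) : a ≤ c ↔ a.toNat ≤ c.toNat := by
  rw [Char.le_def, UInt32.le_iff_toNat_le]; exact Iff.rfl

lemma alnum_bounds (c : Char) (h : PySem.Chars.isalnum c = true) :
    (48 ≤ c.toNat ∧ c.toNat ≤ 57) ∨ (65 ≤ c.toNat ∧ c.toNat ≤ 90) ∨
      (97 ≤ c.toNat ∧ c.toNat ≤ 122) := by
  simp only [PySem.Chars.isalnum, PySem.Chars.isalpha, PySem.Chars.isdigit, PySem.Chars.isupper,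
    PySem.Chars.islower, Bool.or_eq_true, Bool.and_eq_true, decide_eq_true_eq,
    char_le_iff_toNat] at h
  simp at h
  omega

lemma alnum_not_space (c : Char) (h : PySem.Chars.isalnum c = true) :
    PySem.Chars.isspace c = false := by
  have hb := alnum_bounds c h
  simp only [PySem.Chars.isspace, Bool.or_eq_false_iff, Bool.and_eq_false_iff,
    decide_eq_false_iff_not, not_le]
  omega

lemma alnum_ne_underscore (c : Char) (h : PySem.Chars.isalnum c = true) : c ≠ '_' := by
  intro heq
  have hb := alnum_bounds c h
  rw [heq] at hb
  simp at hb

-- ---- B side: split₀ of the masked list is pvTokens ----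

lemma split_go_masked (cs : List Char) : ∀ (cur : List Char) (acc : List (List Char)),
    PySem.Chars.split₀.go (cs.map pvMask) cur acc =
      acc.reverse ++ (if cur.isEmpty then pvTokens cs
        else (cur.reverse ++ cs.takeWhile PySem.Chars.isalnum) ::
          pvTokens (cs.dropWhile PySem.Chars.isalnum)) := by
  induction cs with
  | nil =>
    intro cur acc
    by_cases h : cur.isEmpty <;> simp [PySem.Chars.split₀.go, h, tokens_nil]
  | cons c rest ih =>
    intro cur acc
    by_cases hc : PySem.Chars.isalnum c
    · have hm : pvMask c = c := by simp [pvMask, hc]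
      have hs : PySem.Chars.isspace c = false := alnum_not_space c hc
      simp only [List.map_cons, hm]
      rw [PySem.Chars.split₀.go]
      simp only [hs, Bool.false_eq_true, if_false, ih]
      by_cases hcur : cur.isEmpty
      · have hnil : cur = [] := by simpa [List.isEmpty_iff] using hcur
        subst hnil
        simp [tokens_cons_pos c rest hc]
      · simp [hcur, hc]
    · have hc' : PySem.Chars.isalnum c = false := by simpa using hc
      have hm : pvMask c = ' ' := by simp [pvMask, hc']
      have hsp : PySem.Chars.isspace ' ' = true := by decide
      simp only [List.map_cons, hm]
      rw [PySem.Chars.split₀.go]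
      simp only [hsp, if_true]
      by_cases hcur : cur.isEmpty
      · have hnil : cur = [] := by simpa [List.isEmpty_iff] using hcur
        subst hnil
        simp [ih, tokens_cons_neg c rest hc']
      · simp only [hcur, Bool.false_eq_true, if_false, ih]
        simp [tokens_cons_neg c rest hc', hc']
  -- in the space case with nonempty cur the word is flushed; takeWhile/dropWhile stop at c

lemma split_masked (cs : List Char) :
    PySem.Chars.split₀ (cs.map pvMask) = pvTokens cs := by
  simpa [PySem.Chars.split₀] using split_go_masked cs [] []

-- ---- A side: pvSanitize + strip('_') is join '_' of pvTokens ----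

-- the leading underscore pvSanitize false may emit before reaching state `true`
def pvLead : List Char → List Char
  | [] => []
  | c :: _ => if PySem.Chars.isalnum c then [] else ['_']

-- the trailing underscore: present iff some alnum char exists and the last char is not alnum
def pvTrail (cs : List Char) : List Char :=
  match cs.getLast? with
  | none => []
  | some c =>
    if PySem.Chars.isalnum c || !cs.any PySem.Chars.isalnum then [] else ['_']

lemma sanitize_false_lead (cs : List Char) :
    pvSanitize false cs = pvLead cs ++ pvSanitize true cs := by
  cases cs with
  | nil => rfl
  | cons c rest => by_cases hc : PySem.Chars.isalnum c <;> simp [pvSanitize, pvLead, hc]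

lemma sanitize_false_run (cs : List Char) :
    pvSanitize false cs =
      cs.takeWhile PySem.Chars.isalnum ++
        pvSanitize false (cs.dropWhile PySem.Chars.isalnum) := by
  induction cs with
  | nil => rfl
  | cons c rest ih =>
    by_cases hc : PySem.Chars.isalnum c <;>
      simp [pvSanitize, hc, ih]

lemma tokens_eq_nil_iff (cs : List Char) :
    pvTokens cs = [] ↔ ∀ c ∈ cs, PySem.Chars.isalnum c = false := by
  induction cs using pvTokens.induct with
  | case1 => simp [tokens_nil]
  | case2 c rest hc ih =>
    simp only [tokens_cons_pos c rest hc]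
    simp only [List.mem_cons, List.cons_ne_nil, false_iff, not_forall]
    exact ⟨c, by simp [hc]⟩
  | case3 c rest hc ih =>
    simp only [Bool.not_eq_true] at hc
    simp [tokens_cons_neg c rest hc, ih, hc]

lemma tokens_mem (cs : List Char) :
    ∀ w ∈ pvTokens cs, w ≠ [] ∧ ∀ x ∈ w, PySem.Chars.isalnum x = true := by
  induction cs using pvTokens.induct with
  | case1 => simp [tokens_nil]
  | case2 c rest hc ih =>
    intro w hw
    rw [tokens_cons_pos c rest hc, List.mem_cons] at hw
    rcases hw with hw | hw
    · subst hw
      refine ⟨by simp, ?_⟩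
      intro x hx
      rw [List.mem_cons] at hx
      rcases hx with hx | hx
      · exact hx ▸ hc
      · exact List.mem_takeWhile_imp hx
    · exact ih w hw
  | case3 c rest hc ih =>
    simp only [Bool.not_eq_true] at hc
    rw [tokens_cons_neg c rest hc]
    exact ih

lemma pvTrail_cases (cs : List Char) : pvTrail cs = [] ∨ pvTrail cs = ['_'] := by
  rcases h : cs.getLast? with _ | c <;> simp only [pvTrail, h]
  · simp
  · split <;> simp

lemma pvLead_cases (cs : List Char) : pvLead cs = [] ∨ pvLead cs = ['_'] := by
  cases cs with
  | nil => exact Or.inl rfl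
  | cons c rest => unfold pvLead; split <;> simp

-- the main characterisation of A's loop in state `true`
lemma sanitize_true_eq (cs : List Char) :
    pvSanitize true cs = PySem.Chars.join ['_'] (pvTokens cs) ++ pvTrail cs := by
  suffices H : ∀ n (cs : List Char), cs.length ≤ n →
      pvSanitize true cs = PySem.Chars.join ['_'] (pvTokens cs) ++ pvTrail cs from
    H cs.length cs le_rfl
  intro n
  induction n with
  | zero =>
    intro cs h
    have : cs = [] := by cases cs <;> simp at h ⊢
    subst this
    simp [pvSanitize, tokens_nil, pvTrail, PySem.Chars.join_nil]
  | succ n ih =>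
    intro cs hlen
    cases cs with
    | nil => simp [pvSanitize, tokens_nil, pvTrail, PySem.Chars.join_nil]
    | cons c rest =>
      simp only [List.length_cons, Nat.add_le_add_iff_right] at hlen
      by_cases hc : PySem.Chars.isalnum c
      · -- a word starts at c
        have hrun := sanitize_false_run rest
        cases hds : rest.dropWhile PySem.Chars.isalnum with
        | nil =>
          -- rest is all alphanumeric: one token, no trailing separator
          have hall : ∀ x ∈ rest, PySem.Chars.isalnum x = true := by
            simpa [List.dropWhile_eq_nil_iff] using hds
          have htw : rest.takeWhile PySem.Chars.isalnum = rest :=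
            List.takeWhile_eq_self_iff.2 hall
          have hlast : pvTrail (c :: rest) = [] := by
            unfold pvTrail
            cases hl : (c :: rest).getLast? with
            | none => rfl
            | some l =>
              have hmem : l ∈ c :: rest := List.mem_of_getLast? hl
              have hal : PySem.Chars.isalnum l = true := by
                rw [List.mem_cons] at hmem
                rcases hmem with h | h
                · exact h ▸ hc
                · exact hall l h
              simp [hal]
          rw [show pvSanitize true (c :: rest) = c :: pvSanitize false rest by simp [pvSanitize, hc],
            hrun, hds, tokens_cons_pos c rest hc, hds, tokens_nil, hlast, htw]
          simp [pvSanitize, PySem.Chars.join_singleton]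
        | cons d ds' =>
          have hd : PySem.Chars.isalnum d = false := by
            have hne : rest.dropWhile PySem.Chars.isalnum ≠ [] := by simp [hds]
            have := List.head_dropWhile_not PySem.Chars.isalnum hne
            simpa [hds] using this
          have hds'len : ds'.length ≤ n := by
            have h1 := List.length_dropWhile_le PySem.Chars.isalnum rest
            rw [hds] at h1; simp at h1; omega
          have hIH := ih ds' hds'len
          have hsplit : rest = rest.takeWhile PySem.Chars.isalnum ++ d :: ds' := by
            conv_lhs => rw [← List.takeWhile_append_dropWhile (p := PySem.Chars.isalnum) (l := rest)]
            rw [hds]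
          -- LHS unfolding
          have hL : pvSanitize true (c :: rest) =
              c :: (rest.takeWhile PySem.Chars.isalnum ++ '_' :: pvSanitize true ds') := by
            simp only [pvSanitize, hc, if_true, hrun, hds]
            simp [hd]
          rw [hL, hIH, tokens_cons_pos c rest hc, hds, tokens_cons_neg d ds' hd]
          by_cases htk : pvTokens ds' = []
          · have hall' : ∀ x ∈ ds', PySem.Chars.isalnum x = false := (tokens_eq_nil_iff ds').1 htk
            have htr' : pvTrail ds' = [] := by
              unfold pvTrail
              cases hl : ds'.getLast? with
              | none => rfl
              | some l =>
                have hany0 : ds'.any PySem.Chars.isalnum = false :=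
                  List.any_eq_false.2 (fun x hx => by simp [hall' x hx])
                simp [hany0]
            have htr : pvTrail (c :: rest) = ['_'] := by
              unfold pvTrail
              have hrw : c :: rest = (c :: rest.takeWhile PySem.Chars.isalnum) ++ d :: ds' := by
                rw [List.cons_append, ← hsplit]
              have hlast : (c :: rest).getLast? = (d :: ds').getLast? := by
                rw [hrw]; exact List.getLast?_append_of_ne_nil _ (by simp)
              have hany : (c :: rest).any PySem.Chars.isalnum = true := by simp [List.any_cons, hc]
              cases hl : (d :: ds').getLast? with
              | none => simp at hl
              | some l =>
                have hmem : l ∈ d :: ds' := List.mem_of_getLast? hl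
                have hal : PySem.Chars.isalnum l = false := by
                  rw [List.mem_cons] at hmem
                  rcases hmem with h | h
                  · exact h ▸ hd
                  · exact hall' l h
                rw [hlast, hl]
                simp [hal, hany]
            rw [htk, htr, htr']
            simp [PySem.Chars.join_nil, PySem.Chars.join_singleton]
          · obtain ⟨t, ts, hts⟩ : ∃ t ts, pvTokens ds' = t :: ts := by
              cases h : pvTokens ds' with
              | nil => exact absurd h htk
              | cons t ts => exact ⟨t, ts, rfl⟩
            have hany' : ds'.any PySem.Chars.isalnum = true := by
              by_contra hany
              have h0 : ds'.any PySem.Chars.isalnum = false := by simpa using hany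
              exact htk ((tokens_eq_nil_iff ds').2
                (fun x hx => by simpa using List.any_eq_false.1 h0 x hx))
            have hne' : ds' ≠ [] := by
              rintro rfl; simp at hany'
            have htr : pvTrail (c :: rest) = pvTrail ds' := by
              unfold pvTrail
              have hrw : c :: rest = ((c :: rest.takeWhile PySem.Chars.isalnum) ++ [d]) ++ ds' := by
                rw [List.append_assoc, List.singleton_append, List.cons_append, ← hsplit]
              have hlast : (c :: rest).getLast? = ds'.getLast? := by
                rw [hrw]; exact List.getLast?_append_of_ne_nil _ hne'
              have hany : (c :: rest).any PySem.Chars.isalnum = true := by simp [List.any_cons, hc]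
              rw [hlast, hany, hany']
            rw [hts, htr]
            rw [PySem.Chars.join_cons_cons]
            simp
      · -- c is a separator: skipped in state `true`
        have hc' : PySem.Chars.isalnum c = false := by simpa using hc
        have htr : pvTrail (c :: rest) = pvTrail rest := by
          cases rest with
          | nil => simp [pvTrail, hc']
          | cons r rs =>
            unfold pvTrail
            rw [List.getLast?_cons_cons]
            simp [List.any_cons, hc']
        rw [show pvSanitize true (c :: rest) = pvSanitize true rest by simp [pvSanitize, hc'],
          ih rest hlen, tokens_cons_neg c rest hc', htr]

-- head and last of a '_'-join of nonempty all-alphanumeric words are alphanumeric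
lemma join_head (t : List Char) (ts : List (List Char))
    (h : ∀ w ∈ t :: ts, w ≠ [] ∧ ∀ x ∈ w, PySem.Chars.isalnum x = true) :
    ∃ c rest, PySem.Chars.join ['_'] (t :: ts) = c :: rest ∧ PySem.Chars.isalnum c = true := by
  obtain ⟨hne, hal⟩ := h t (by simp)
  obtain ⟨c, t', rfl⟩ : ∃ c t', t = c :: t' := by
    cases t with
    | nil => exact absurd rfl hne
    | cons c t' => exact ⟨c, t', rfl⟩
  cases ts with
  | nil => exact ⟨c, t', by simp [PySem.Chars.join_singleton], hal c (by simp)⟩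
  | cons u us =>
    exact ⟨c, t' ++ '_' :: PySem.Chars.join ['_'] (u :: us),
      by rw [PySem.Chars.join_cons_cons]; simp, hal c (by simp)⟩

lemma join_rev_head (ts : List (List Char)) (t : List Char)
    (h : ∀ w ∈ t :: ts, w ≠ [] ∧ ∀ x ∈ w, PySem.Chars.isalnum x = true) :
    ∃ c rest, (PySem.Chars.join ['_'] (t :: ts)).reverse = c :: rest ∧
      PySem.Chars.isalnum c = true := by
  induction ts generalizing t with
  | nil =>
    obtain ⟨hne, hal⟩ := h t (by simp)
    obtain ⟨c, r, hr⟩ : ∃ c r, t.reverse = c :: r := by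
      cases hrev : t.reverse with
      | nil => exact absurd (by simpa using hrev) hne
      | cons c r => exact ⟨c, r, rfl⟩
    refine ⟨c, r, by simp [PySem.Chars.join_singleton, hr], ?_⟩
    have : c ∈ t := by rw [← List.mem_reverse, hr]; simp
    exact hal c this
  | cons u us ihts =>
    obtain ⟨c, r, hr, hal⟩ := ihts u (fun w hw => h w (by simp at hw ⊢; tauto))
    refine ⟨c, r ++ ('_' :: t.reverse), ?_, hal⟩
    have hj : PySem.Chars.join ['_'] (t :: u :: us) =
        t ++ '_' :: PySem.Chars.join ['_'] (u :: us) := by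
      rw [PySem.Chars.join_cons_cons]; simp
    rw [hj]
    simp [hr]

lemma strip_eq (cs : List Char) :
    PySem.Chars.stripChars (pvSanitize false cs) ['_'] =
      PySem.Chars.join ['_'] (pvTokens cs) := by
  rw [sanitize_false_lead, sanitize_true_eq]
  cases hts : pvTokens cs with
  | nil =>
    have hall : ∀ x ∈ cs, PySem.Chars.isalnum x = false := (tokens_eq_nil_iff cs).1 hts
    have htr : pvTrail cs = [] := by
      unfold pvTrail
      cases hl : cs.getLast? with
      | none => rfl
      | some l =>
        have hany0 : cs.any PySem.Chars.isalnum = false :=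
          List.any_eq_false.2 (fun x hx => by simp [hall x hx])
        simp [hany0]
    rw [htr]
    rcases pvLead_cases cs with h | h <;> rw [h] <;>
      simp [PySem.Chars.join_nil, PySem.Chars.stripChars]
  | cons t ts =>
    have hmem := hts ▸ tokens_mem cs
    obtain ⟨c₀, j', hj, hc₀⟩ := join_head t ts hmem
    obtain ⟨l₀, jr', hjr, hl₀⟩ := join_rev_head ts t hmem
    have hp₀ : ¬ (c₀ = '_') := alnum_ne_underscore c₀ hc₀
    have hpl : ¬ (l₀ = '_') := alnum_ne_underscore l₀ hl₀
    set J := PySem.Chars.join ['_'] (t :: ts) with hJ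
    unfold PySem.Chars.stripChars
    simp only
    have step1 : ∀ tr, (tr = [] ∨ tr = ['_']) →
        List.dropWhile (fun c => List.contains ['_'] c) (pvLead cs ++ (J ++ tr)) = J ++ tr := by
      intro tr _
      rcases pvLead_cases cs with h | h <;>
        rw [h] <;> simp [hj, hp₀]
    rw [step1 (pvTrail cs) (pvTrail_cases cs)]
    have step2 : List.dropWhile (fun c => List.contains ['_'] c) (J ++ pvTrail cs).reverse =
        J.reverse := by
      rw [List.reverse_append]
      rcases pvTrail_cases cs with h | h <;>
        rw [h] <;> simp [hjr, hpl]
    rw [step2, List.reverse_reverse]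

-- ===== VERDICT (by name: the statement is the Claim_ definition above) =====
theorem normalize_header_name_spec : Claim_equal_normalize_header_name := by
  intro value _
  unfold Spec_normalize_header_name normalize_header_name normalize_header_name_alt
  rw [split_masked, strip_eq]
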